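-- pv_equiv track=rewrite | github.com/tony-andreev94/Python-Fundamentals | 06. Text Processing/07. String Explosion.py | explosion_func
-- ===== SOURCE A (Python) =====
-- def explosion_func(text):
--     text_list = [char for char in text]
--     explosion_power = 0
--     for index in range(len(text_list)):
--         if text_list[index] == ">" and index + 1 < len(text_list):
--             explosion_power += int(text_list[index + 1])
--             for i in range(explosion_power):
--                 if index + 1 + i < len(text_list) and text_list[index + 1 + i] != ">":
--                     text_list[index + 1 + i] = 0
--                     explosion_power -= 1
--                 else:
--                     break
--     return "".join(each for each in text_list if each != 0)
-- ===== SOURCE B (Python) =====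
-- def explosion_func(text):
--     result = []
--     power = 0
--     for i, ch in enumerate(text):
--         if ch == ">":
--             result.append(ch)
--             if i + 1 < len(text):
--                 power += int(text[i + 1])
--         elif power > 0:
--             power -= 1
--         else:
--             result.append(ch)
--     return "".join(result)
-- ===== Notes on version B (the rewrite author's own statement) =====
-- stated objective: simpler
-- what changed: Replaces the mutable list copy with nested destroy-ahead loop, 0-sentinel marking and final filter by a single forward pass that keeps a running power counter and builds the output directly.
import Mathlib
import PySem

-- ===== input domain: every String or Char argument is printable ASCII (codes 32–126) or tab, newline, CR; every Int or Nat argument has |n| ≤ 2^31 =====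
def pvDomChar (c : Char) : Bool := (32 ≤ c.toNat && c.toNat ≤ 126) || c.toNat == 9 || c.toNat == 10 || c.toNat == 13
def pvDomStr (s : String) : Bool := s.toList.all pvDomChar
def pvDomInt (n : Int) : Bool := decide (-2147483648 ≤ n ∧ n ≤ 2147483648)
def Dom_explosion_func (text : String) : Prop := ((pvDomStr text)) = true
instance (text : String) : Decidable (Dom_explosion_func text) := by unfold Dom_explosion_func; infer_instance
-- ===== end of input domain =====

-- B replaces A's list copy + nested destroy-ahead loop + 0-sentinel marking + final filter
-- with one forward pass keeping a running power counter (objective: simpler).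

-- ===== PORT A =====
-- int(cell): a destroyed cell holds the int 0, so int(0) = 0; for a char cell Pre_ guarantees
-- an ASCII digit, where int(c) = c.toNat - 48 exactly.
def pvCellVal : Option Char → Int
  | none => 0
  | some c => (c.toNat : Int) - 48

-- inner loop `for i in range(p): if index+1+i < len and lst[index+1+i] != ">": destroy else break`,
-- r = remaining iterations of the (fixed-at-entry) range, i = current offset
def pvInner : List (Option Char) → Nat → Int → Nat → Nat → List (Option Char) × Int
  | lst, _, power, _, 0 => (lst, power)
  | lst, idx, power, i, r+1 =>
    if idx + 1 + i < lst.length ∧ lst.getD (idx+1+i) none ≠ some '>' then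
      pvInner (lst.set (idx+1+i) none) idx (power - 1) (i+1) r
    else (lst, power)

-- outer loop over `range(len(text_list))`
def pvOuter : List (Option Char) → Int → List Nat → List (Option Char)
  | lst, _, [] => lst
  | lst, power, idx :: rest =>
    if lst.getD idx none = some '>' ∧ idx + 1 < lst.length then
      let power' := power + pvCellVal (lst.getD (idx+1) none)
      let p := pvInner lst idx power' 0 power'.toNat
      pvOuter p.1 p.2 rest
    else pvOuter lst power rest

def explosion_func (text : String) : String :=
  let lst := text.toList.map some
  String.mk ((pvOuter lst 0 (List.range lst.length)).filterMap id)

-- ===== PORT B =====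
-- int(c) for the ASCII digit guaranteed by Pre_
def pvDigitVal (c : Char) : Int := (c.toNat : Int) - 48

-- the single forward pass of Source B: enumerate's text[i+1] is the head of the remaining list
def pvBLoop : List Char → Int → List Char → List Char
  | [], _, acc => acc.reverse
  | c :: rest, power, acc =>
    if c = '>' then
      pvBLoop rest (match rest with | [] => power | d :: _ => power + pvDigitVal d) (c :: acc)
    else if power > 0 then pvBLoop rest (power - 1) acc
    else pvBLoop rest power (c :: acc)

def explosion_func_alt (text : String) : String :=
  String.mk (pvBLoop text.toList 0 [])

-- ===== PRECONDITION & SPEC =====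
-- Pre_ excludes exactly the inputs where Python A raises ValueError: a non-terminal '>' whose
-- next character is not an ASCII digit (int() of that character fails); B raises there too.
def pvPreL : List Char → Bool
  | [] => true
  | [_] => true
  | a :: b :: rest => (a ≠ '>' || b.isDigit) && pvPreL (b :: rest)

def Pre_explosion_func (text : String) : Prop := pvPreL text.toList = true
instance (text : String) : Decidable (Pre_explosion_func text) := by unfold Pre_explosion_func; infer_instance

def pvWitness_explosion_func : String := ">2ab>1cd"

def Spec_explosion_func (text : String) (out : String) : Prop := out = explosion_func_alt text
instance (text : String) (out : String) : Decidable (Spec_explosion_func text out) := by unfold Spec_explosion_func; infer_instance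

-- ===== CLAIM (what is proved, stated in full; the proofs are below) =====
def Claim_equal_explosion_func : Prop := ∀ (text : String), Dom_explosion_func text → Pre_explosion_func text → Spec_explosion_func text (explosion_func text)

-- ===== LEMMAS AND PROOFS =====

-- reference recursion: B's pass without the accumulator
def pvSpecF : List Char → Int → List Char
  | [], _ => []
  | c :: rest, power =>
    if c = '>' then
      c :: pvSpecF rest (match rest with | [] => power | d :: _ => power + pvDigitVal d)
    else if power > 0 then pvSpecF rest (power - 1)
    else c :: pvSpecF rest power

theorem pvBLoop_eq : ∀ (l : List Char) (power : Int) (acc : List Char),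
    pvBLoop l power acc = acc.reverse ++ pvSpecF l power := by
  intro l
  induction l with
  | nil => intro power acc; simp [pvBLoop, pvSpecF]
  | cons c rest ih =>
    intro power acc
    simp only [pvBLoop, pvSpecF]
    split_ifs with h1 h2 <;> simp [ih]

-- number of cells destroyed from the start of `s` before hitting '>' (Python's break)
def pvStop (s : List Char) : Nat := (s.takeWhile (fun c => c ≠ '>')).length

theorem pvStop_le (s : List Char) : pvStop s ≤ s.length := by
  have h := List.takeWhile_append_dropWhile (p := fun c => c ≠ '>') (l := s)
  calc pvStop s ≤ pvStop s + (s.dropWhile (fun c => c ≠ '>')).length := Nat.le_add_right _ _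
    _ = s.length := by rw [pvStop, ← List.length_append, h]

theorem pvStop_get : ∀ (s : List Char), pvStop s < s.length → s[pvStop s]? = some '>' := by
  intro s
  induction s with
  | nil => simp [pvStop]
  | cons c cs ih =>
    intro h
    by_cases hc : c = '>'
    · subst hc
      simp [pvStop, List.takeWhile_cons]
    · have hstop : pvStop (c :: cs) = pvStop cs + 1 := by
        simp [pvStop, List.takeWhile_cons, hc]
      rw [hstop] at h ⊢
      simp only [List.getElem?_cons_succ]
      exact ih (by simpa using h)

theorem pvStop_take : ∀ (s : List Char) (d : Nat), d ≤ pvStop s → ∀ c ∈ s.take d, c ≠ '>' := by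
  intro s
  induction s with
  | nil => simp
  | cons c cs ih =>
    intro d hd x hx
    cases d with
    | zero => simp at hx
    | succ d =>
      by_cases hc : c = '>'
      · subst hc; simp [pvStop, List.takeWhile_cons] at hd
      · have hstop : pvStop (c :: cs) = pvStop cs + 1 := by
          simp [pvStop, List.takeWhile_cons, hc]
        rw [hstop] at hd
        simp only [List.take_succ_cons, List.mem_cons] at hx
        rcases hx with rfl | hx
        · exact hc
        · exact ih d (by omega) x hx

theorem pvPreL_tail : ∀ (c : Char) (s : List Char), pvPreL (c :: s) = true → pvPreL s = true := by
  intro c s h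
  cases s with
  | nil => rfl
  | cons b rest => simp only [pvPreL, Bool.and_eq_true] at h; exact h.2

theorem pvPreL_drop : ∀ (n : Nat) (s : List Char), pvPreL s = true → pvPreL (s.drop n) = true := by
  intro n
  induction n with
  | zero => intro s h; simpa using h
  | succ n ih =>
    intro s h
    cases s with
    | nil => simpa using h
    | cons c rest => simpa using ih rest (pvPreL_tail c rest h)

-- skip lemma: pvSpecF consumes a block of non-'>' chars one power unit each
theorem pvSpecF_skip : ∀ (u s : List Char) (power : Int),
    (∀ c ∈ u, c ≠ '>') → (u.length : Int) ≤ power →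
    pvSpecF (u ++ s) power = pvSpecF s (power - u.length) := by
  intro u
  induction u with
  | nil => intro s power _ _; simp
  | cons c u ih =>
    intro s power hne hle
    have hc : c ≠ '>' := hne c (by simp)
    have hpos : power > 0 := by
      simp only [List.length_cons] at hle
      push_cast at hle
      omega
    simp only [List.cons_append, pvSpecF, if_neg hc, if_pos hpos]
    rw [ih s (power - 1) (fun x hx => hne x (by simp [hx])) (by simp at hle ⊢; omega)]
    congr 1
    simp only [List.length_cons]
    push_cast
    omega

-- characterisation of the inner destroy loop
theorem pvInner_eq : ∀ (r : Nat) (P : List (Option Char)) (suffix : List Char) (idx : Nat)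
    (power : Int) (i : Nat), idx + 1 + i = P.length →
    pvInner (P ++ suffix.map some) idx power i r =
      (P ++ List.replicate (min r (pvStop suffix)) none
         ++ (suffix.drop (min r (pvStop suffix))).map some,
       power - min r (pvStop suffix)) := by
  intro r
  induction r with
  | zero => intro P suffix idx power i hP; simp [pvInner]
  | succ r ih =>
    intro P suffix idx power i hP
    cases suffix with
    | nil =>
      simp only [pvInner, List.map_nil, List.append_nil]
      rw [if_neg (by simp [hP])]
      simp [pvStop]
    | cons c cs =>
      by_cases hc : c = '>'
      · subst hc
        simp only [pvInner]
        rw [if_neg]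
        · simp [pvStop, List.takeWhile_cons]
        · intro h
          have hg : (P ++ (some '>' :: cs.map some)).getD (idx+1+i) none = some '>' := by
            rw [hP, List.getD_append_right _ _ _ _ (le_refl P.length)]
            simp
          simp only [List.map_cons] at h
          exact h.2 hg
      · simp only [pvInner, List.map_cons]
        rw [if_pos]
        · have hset : (P ++ some c :: cs.map some).set (idx+1+i) none
              = (P ++ [none]) ++ cs.map some := by
            rw [hP, List.set_append_right _ _ (le_refl P.length)]
            simp
          rw [hset, ih (P ++ [none]) cs idx (power - 1) (i+1) (by simp; omega)]
          have hstop : pvStop (c :: cs) = pvStop cs + 1 := by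
            simp [pvStop, List.takeWhile_cons, hc]
          have hmin : min (r+1) (pvStop (c :: cs)) = min r (pvStop cs) + 1 := by
            rw [hstop]; omega
          rw [hmin]
          simp only [Prod.mk.injEq]
          constructor
          · simp [List.replicate_succ, List.append_assoc]
          · push_cast; ring
        · refine ⟨by rw [hP]; simp, ?_⟩
          rw [hP, List.getD_append_right _ _ _ _ (le_refl P.length)]
          simp [hc]

-- main invariant for the outer loop
theorem pvOuter_eq : ∀ (m k a : Nat) (pre0 : List (Option Char)) (s : List Char) (power : Int),
    pre0.length = k → m = a + s.length → pvPreL s = true → 0 ≤ power →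
    (0 < power → s = [] ∨ ∃ cs, s = '>' :: cs) →
    ((pvOuter (pre0 ++ List.replicate a none ++ s.map some) power (List.range' k m)).filterMap id)
      = pre0.filterMap id ++ pvSpecF s power := by
  intro m
  induction m with
  | zero =>
    intro k a pre0 s power hk hm hpre hpow hfr
    have ha : a = 0 := by omega
    have hs : s = [] := by
      cases s with
      | nil => rfl
      | cons c cs => simp at hm
    subst ha hs
    simp [pvOuter, pvSpecF]
  | succ m ih =>
    intro k a pre0 s power hk hm hpre hpow hfr
    subst hk
    rw [List.range'_succ]
    cases a with
    | succ a =>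
      -- already-destroyed cell at the current index: the iteration is a no-op
      have hgd : (pre0 ++ List.replicate (a+1) none ++ s.map some).getD pre0.length none
          = none := by
        rw [List.append_assoc, List.getD_append_right _ _ _ _ (le_refl _)]
        simp [List.replicate_succ]
      simp only [pvOuter]
      rw [if_neg (by rw [hgd]; rintro ⟨h1, _⟩; exact absurd h1 (by simp))]
      have hre : pre0 ++ List.replicate (a+1) none ++ s.map some
          = (pre0 ++ [none]) ++ List.replicate a none ++ s.map some := by
        simp [List.replicate_succ]
      rw [hre, ih (pre0.length + 1) a (pre0 ++ [none]) s power (by simp) (by omega) hpre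
        hpow hfr]
      simp
    | zero =>
      have hl : pre0 ++ List.replicate 0 none ++ s.map some = pre0 ++ s.map some := by simp
      rw [hl]
      cases s with
      | nil => simp at hm
      | cons c cs =>
        have hget : (pre0 ++ (c :: cs).map some).getD pre0.length none = some c := by
          rw [List.getD_append_right _ _ _ _ (le_refl _)]
          simp
        by_cases hc : c = '>'
        · subst hc
          cases cs with
          | nil =>
            -- terminal '>': the bound check index+1 < len fails
            simp only [pvOuter]
            rw [if_neg (by rintro ⟨_, h2⟩; simp at h2)]
            have hre : pre0 ++ (['>'] : List Char).map some
                = (pre0 ++ [some '>']) ++ List.replicate 0 none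
                    ++ ([] : List Char).map some := by simp
            rw [hre, ih (pre0.length + 1) 0 (pre0 ++ [some '>']) [] power (by simp)
              (by simp only [List.length_cons, List.length_nil] at hm ⊢; omega)
              rfl hpow (fun _ => Or.inl rfl)]
            simp [pvSpecF]
          | cons d cs' =>
            -- non-terminal '>': add int(next digit), then run the destroy loop
            have hdig : d.isDigit = true := by
              simp only [pvPreL, Bool.and_eq_true] at hpre
              have h1 := hpre.1
              simpa using h1
            have hd0 : (0:Int) ≤ pvDigitVal d ∧ pvDigitVal d ≤ 9 := by
              simp only [Char.isDigit, Bool.and_eq_true, decide_eq_true_eq, ge_iff_le] at hdig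
              obtain ⟨h1, h2⟩ := hdig
              rw [UInt32.le_iff_toNat_le] at h1 h2
              have c0 : ('0' : Char).val.toNat = 48 := rfl
              have c9 : ('9' : Char).val.toNat = 57 := rfl
              rw [c0] at h1
              rw [c9] at h2
              simp only [pvDigitVal, Char.toNat]
              omega
            simp only [pvOuter]
            rw [if_pos ⟨hget, by simp⟩]
            have hget1 : (pre0 ++ ('>' :: d :: cs').map some).getD (pre0.length + 1) none
                = some d := by
              rw [List.getD_append_right _ _ _ _ (by omega)]
              simp
            rw [hget1]
            have hre : pre0 ++ ('>' :: d :: cs').map some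
                = (pre0 ++ [some '>']) ++ (d :: cs').map some := by simp
            rw [hre]
            set power' := power + pvCellVal (some d) with hpw
            have hcv : pvCellVal (some d) = pvDigitVal d := rfl
            have hpw0 : 0 ≤ power' := by rw [hpw, hcv]; omega
            rw [pvInner_eq power'.toNat (pre0 ++ [some '>']) (d :: cs') pre0.length power' 0
              (by simp)]
            set dN := min power'.toNat (pvStop (d :: cs')) with hdN
            have hdle : dN ≤ power'.toNat := Nat.min_le_left _ _
            have hdleI : (dN : Int) ≤ power' := by
              have := Int.toNat_of_nonneg hpw0
              omega
            have hdstop : dN ≤ pvStop (d :: cs') := Nat.min_le_right _ _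
            have hds : dN ≤ (d :: cs').length := le_trans hdstop (pvStop_le _)
            have hfr' : 0 < power' - (dN : Int) → (d :: cs').drop dN = []
                ∨ ∃ ys, (d :: cs').drop dN = '>' :: ys := by
              intro hgt
              have hdlt : dN < power'.toNat := by omega
              have hde : dN = pvStop (d :: cs') := by omega
              by_cases hend : dN = (d :: cs').length
              · left; simp [hend]
              · right
                have hlt : dN < (d :: cs').length := lt_of_le_of_ne hds hend
                obtain ⟨y, ys, hys⟩ : ∃ y ys, (d :: cs').drop dN = y :: ys := by
                  cases hdr : (d :: cs').drop dN with
                  | nil =>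
                    exact absurd (List.drop_eq_nil_iff.mp hdr) (by omega)
                  | cons y ys => exact ⟨y, ys, rfl⟩
                have hyg : (d :: cs')[dN]? = some y := by
                  have h0 : ((d :: cs').drop dN)[0]? = some y := by rw [hys]; rfl
                  rw [List.getElem?_drop] at h0
                  simpa using h0
                have hy : y = '>' := by
                  have hsg := pvStop_get (d :: cs') (by omega)
                  rw [← hde, hyg] at hsg
                  exact Option.some.inj hsg
                exact ⟨ys, by rw [hys, hy]⟩
            have hihm : m = dN + ((d :: cs').drop dN).length := by
              rw [List.length_drop]
              simp only [List.length_cons] at hds ⊢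
              simp only [List.length_cons] at hm
              omega
            rw [ih (pre0.length + 1) dN (pre0 ++ [some '>']) ((d :: cs').drop dN)
              (power' - dN) (by simp) hihm
              (pvPreL_drop dN _ (pvPreL_tail _ _ hpre)) (by omega) hfr']
            have hskip : pvSpecF (d :: cs') power'
                = pvSpecF ((d :: cs').drop dN) (power' - dN) := by
              have htk : d :: cs' = (d :: cs').take dN ++ (d :: cs').drop dN :=
                (List.take_append_drop dN (d :: cs')).symm
              have hul : ((d :: cs').take dN).length = dN := by
                rw [List.length_take]
                omega
              calc pvSpecF (d :: cs') power'
                  = pvSpecF ((d :: cs').take dN ++ (d :: cs').drop dN) power' := by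
                    rw [← htk]
                _ = pvSpecF ((d :: cs').drop dN) (power' - ((d :: cs').take dN).length) :=
                    pvSpecF_skip _ _ power' (pvStop_take _ dN hdstop) (by rw [hul]; exact hdleI)
                _ = pvSpecF ((d :: cs').drop dN) (power' - dN) := by rw [hul]
            rw [← hskip]
            have hsp : pvSpecF ('>' :: d :: cs') power = '>' :: pvSpecF (d :: cs') power' := by
              simp [pvSpecF, hpw, hcv]
            rw [hsp]
            simp
        · -- ordinary character: power must be 0 here, so it is kept
          have hpz : power = 0 := by
            rcases lt_or_eq_of_le hpow with h | h
            · rcases hfr h with h1 | ⟨ys, h1⟩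
              · simp at h1
              · injection h1 with h2 _
                exact absurd h2 hc
            · omega
          subst hpz
          simp only [pvOuter]
          rw [if_neg (by rw [hget]; rintro ⟨h1, _⟩; exact hc (by injection h1))]
          have hre : pre0 ++ (c :: cs).map some
              = (pre0 ++ [some c]) ++ List.replicate 0 none ++ cs.map some := by simp
          rw [hre, ih (pre0.length + 1) 0 (pre0 ++ [some c]) cs 0 (by simp)
            (by simp at hm; omega) (pvPreL_tail _ _ hpre) le_rfl
            (fun h => absurd h (by omega))]
          have hsp : pvSpecF (c :: cs) 0 = c :: pvSpecF cs 0 := by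
            simp [pvSpecF, hc]
          rw [hsp]
          simp

-- ===== VERDICT (by name: the statement is the Claim_ definition above) =====
theorem explosion_func_spec : Claim_equal_explosion_func := by
  intro text _ hpre
  unfold Spec_explosion_func explosion_func explosion_func_alt
  rw [pvBLoop_eq]
  have h := pvOuter_eq text.toList.length 0 0 [] text.toList 0 rfl (by simp) hpre le_rfl
    (by omega)
  simp only [List.length_map, List.range_eq_range']
  simp only [List.replicate, List.nil_append, List.append_nil] at h
  rw [h]
  simp
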